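-- pv_equiv track=rewrite | github.com/lsankar4033/rexpy | src/parser.py | parse_re_string
-- ===== SOURCE A (Python) =====
-- def parse_re_string(re_str):
--     re_terminals = []
--
--     prev_char = None
--     for char in re_str:
--         new_terminal = char
--         if prev_char is None and char is "*":
--             raise ValueError("Regex string %s has leading '*' character!" % re_str)
--
--         elif prev_char is "*" and char is "*":
--             raise ValueError("Regex string %s has consecutive '*' characters!" % re_str)
--
--         elif prev_char is not "*" and char is "*":
--             re_terminals.pop()
--             new_terminal = prev_char + char
--
--         re_terminals.append(new_terminal)
--         prev_char = char
--
--     return re_terminals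
-- ===== SOURCE B (Python) =====
-- def parse_re_string(re_str):
--     terminals = []
--     n = len(re_str)
--     i = 0
--     while i < n:
--         char = re_str[i]
--         if char == "*":
--             if i == 0:
--                 raise ValueError("Regex string %s has leading '*' character!" % re_str)
--             raise ValueError("Regex string %s has consecutive '*' characters!" % re_str)
--         if i + 1 < n and re_str[i + 1] == "*":
--             terminals.append(char + "*")
--             i += 2
--         else:
--             terminals.append(char)
--             i += 1
--     return terminals
-- ===== Notes on version B (the rewrite author's own statement) =====
-- stated objective: alternative
-- what changed: Replaced the look-behind scan with prev_char state and append-then-pop merging by an index-based look-ahead while loop that peeks at the next character and advances by 1 or 2, never popping.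
import Mathlib
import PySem

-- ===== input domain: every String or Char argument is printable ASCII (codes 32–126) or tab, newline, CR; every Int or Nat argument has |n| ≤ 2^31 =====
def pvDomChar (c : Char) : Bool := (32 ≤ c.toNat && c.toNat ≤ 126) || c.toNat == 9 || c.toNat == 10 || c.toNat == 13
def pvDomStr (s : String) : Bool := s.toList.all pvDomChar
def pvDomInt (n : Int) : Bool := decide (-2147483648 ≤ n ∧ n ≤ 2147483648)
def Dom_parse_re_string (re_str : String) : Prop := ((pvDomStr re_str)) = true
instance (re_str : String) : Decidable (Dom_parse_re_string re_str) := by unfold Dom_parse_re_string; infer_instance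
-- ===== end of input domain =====

-- B changes the decomposition only (look-ahead variable-step scan instead of look-behind pop/merge); equal on all non-raising inputs.
-- ===== PORT A =====
-- A's loop: state (prev_char, re_terminals); the two raise branches return [] (excluded by Pre_).
def parseA_loop : Option Char → List String → List Char → List String
  | _, acc, [] => acc
  | prev, acc, c :: rest =>
    if prev = none ∧ c = '*' then []           -- raise ValueError (leading '*')
    else if prev = some '*' ∧ c = '*' then []  -- raise ValueError (consecutive '*')
    else if prev ≠ some '*' ∧ c = '*' then
      -- re_terminals.pop(); new_terminal = prev_char + char (prev is some p on this branch)
      parseA_loop (some c) (acc.dropLast ++ [String.mk [(prev.getD ' '), c]]) rest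
    else
      parseA_loop (some c) (acc ++ [String.mk [c]]) rest

def parse_re_string (re_str : String) : List String :=
  parseA_loop none [] re_str.toList

-- ===== PORT B =====
-- B's while loop: if re_str[i] is '*' raise (here: return [], excluded by Pre_);
-- else peek at re_str[i+1]: step by 2 emitting "c*", or by 1 emitting "c".
def parseB_loop : List Char → List String
  | [] => []
  | c :: '*' :: rest' =>
    if c = '*' then [] else String.mk [c, '*'] :: parseB_loop rest'
  | c :: rest =>
    if c = '*' then [] else String.mk [c] :: parseB_loop rest

def parse_re_string_alt (re_str : String) : List String :=
  parseB_loop re_str.toList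

-- ===== PRECONDITION & SPEC =====
-- true iff no two adjacent characters are both '*'
def pvNoDoubleStar : List Char → Bool
  | a :: b :: rest => !(a == '*' && b == '*') && pvNoDoubleStar (b :: rest)
  | _ => true

-- Pre_ excludes exactly the inputs on which A raises ValueError: a leading '*' or two consecutive '*'s.
def Pre_parse_re_string (re_str : String) : Prop :=
  re_str.toList.head? ≠ some '*' ∧ pvNoDoubleStar re_str.toList = true
instance (re_str : String) : Decidable (Pre_parse_re_string re_str) := by
  unfold Pre_parse_re_string; infer_instance

def pvWitness_parse_re_string : String := "ab*c"

def Spec_parse_re_string (re_str : String) (out : List String) : Prop := out = parse_re_string_alt re_str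
instance (re_str : String) (out : List String) : Decidable (Spec_parse_re_string re_str out) := by unfold Spec_parse_re_string; infer_instance

-- ===== CLAIM (what is proved, stated in full; the proofs are below) =====
def Claim_equal_parse_re_string : Prop := ∀ (re_str : String), Dom_parse_re_string re_str → Pre_parse_re_string re_str → Spec_parse_re_string re_str (parse_re_string re_str)

-- ===== LEMMAS AND PROOFS =====

-- Mutual invariant, by strong induction on length:
-- (i)  after a non-star prev p (its singleton just appended), A's loop = acc ++ B's loop on (p::l);
-- (ii) after a star prev (merge just done), A's loop = acc ++ B's loop on l (whose head is not '*').
theorem parse_key : ∀ n (l : List Char), l.length ≤ n →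
    ((∀ (acc : List String) (p : Char), p ≠ '*' →
        pvNoDoubleStar (p :: l) = true →
        parseA_loop (some p) (acc ++ [String.mk [p]]) l = acc ++ parseB_loop (p :: l)) ∧
     (∀ (acc : List String),
        pvNoDoubleStar l = true → l.head? ≠ some '*' →
        parseA_loop (some '*') acc l = acc ++ parseB_loop l)) := by
  intro n
  induction n with
  | zero =>
    intro l hl
    have : l = [] := List.eq_nil_of_length_eq_zero (Nat.le_zero.mp hl)
    subst this
    exact ⟨fun acc p hp _ => by simp [parseA_loop, parseB_loop, hp],
           fun acc _ _ => by simp [parseA_loop, parseB_loop]⟩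
  | succ n ih =>
    intro l hl
    constructor
    · intro acc p hp hch
      match l with
      | [] => simp [parseA_loop, parseB_loop, hp]
      | c :: rest =>
        have hlen : rest.length ≤ n := by
          simpa using Nat.lt_succ_iff.mp (Nat.lt_of_lt_of_le (by simp) hl)
        simp only [pvNoDoubleStar, Bool.and_eq_true] at hch
        obtain ⟨_, hch'⟩ := hch
        by_cases hc : c = '*'
        · subst hc
          -- merge step: pop [p], append [p,'*'], prev becomes '*'
          have hr : rest.head? ≠ some '*' := by
            cases rest with
            | nil => simp
            | cons d r =>
              simp only [pvNoDoubleStar, Bool.and_eq_true] at hch'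
              intro h
              simp at h
              simp [h] at hch'
          have hchr : pvNoDoubleStar rest = true := by
            cases rest with
            | nil => rfl
            | cons d r =>
              simp only [pvNoDoubleStar, Bool.and_eq_true] at hch'
              exact hch'.2
          have hA : parseA_loop (some p) (acc ++ [String.mk [p]]) ('*' :: rest)
              = parseA_loop (some '*') (acc ++ [String.mk [p, '*']]) rest := by
            simp [parseA_loop, hp]
          rw [hA, (ih rest hlen).2 (acc ++ [String.mk [p, '*']]) hchr hr]
          simp [parseB_loop, hp]
        · -- plain step: append [c], prev becomes c
          have hA : parseA_loop (some p) (acc ++ [String.mk [p]]) (c :: rest)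
              = parseA_loop (some c) ((acc ++ [String.mk [p]]) ++ [String.mk [c]]) rest := by
            simp [parseA_loop, hc, hp]
          rw [hA, (ih rest hlen).1 (acc ++ [String.mk [p]]) c hc hch']
          cases rest with
          | nil => simp [parseB_loop, hp, hc]
          | cons d r =>
            by_cases hd : d = '*' <;> simp [hd, parseB_loop, hp, hc]
    · intro acc hch hhd
      match l with
      | [] => simp [parseA_loop, parseB_loop]
      | c :: rest =>
        have hc : c ≠ '*' := by intro h; exact hhd (by simp [h])
        have hlen : rest.length ≤ n := by
          simpa using Nat.lt_succ_iff.mp (Nat.lt_of_lt_of_le (by simp) hl)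
        have hA : parseA_loop (some '*') acc (c :: rest)
            = parseA_loop (some c) (acc ++ [String.mk [c]]) rest := by
          simp [parseA_loop, hc]
        rw [hA, (ih rest hlen).1 acc c hc hch]

-- ===== VERDICT (by name: the statement is the Claim_ definition above) =====
theorem parse_re_string_spec : Claim_equal_parse_re_string := by
  intro s _ hpre
  unfold Spec_parse_re_string parse_re_string parse_re_string_alt
  obtain ⟨hhd, hch⟩ := hpre
  match hl : s.toList with
  | [] => simp [parseA_loop, parseB_loop]
  | c :: rest =>
    rw [hl] at hhd hch
    have hc : c ≠ '*' := by intro h; exact hhd (by simp [h])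
    have hA : parseA_loop none [] (c :: rest)
        = parseA_loop (some c) [String.mk [c]] rest := by
      simp [parseA_loop, hc]
    rw [hA]
    have := (parse_key rest.length rest le_rfl).1 [] c hc hch
    simpa using this
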